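-- pv_equiv track=rewrite | github.com/FezzMad/Algorithmic_tasks | Python/from_MSU_course/lection_3/HalfTranspose.py | below_diagonal
-- ===== SOURCE A (Python) =====
-- def below_diagonal(matrix):
--     left_half_matrix = []
--     for i in range(0, len(matrix)):
--         list = []
--         for j in range(0, len(matrix[0])):
--             if j <= i:
--                 list.append(matrix[i][j])
--         left_half_matrix.append(list)
--     return left_half_matrix
-- ===== SOURCE B (Python) =====
-- def below_diagonal(matrix):
--     # Simpler: slice the first min(i+1, ncols) elements of row i; no inner loop, no branch.
--     ncols = len(matrix[0]) if matrix else 0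
--     return [row[:min(i + 1, ncols)] for i, row in enumerate(matrix)]
-- ===== Notes on version B (the rewrite author's own statement) =====
-- stated objective: simpler
-- what changed: Replaces the nested index loop that filters columns with j<=i by a single per-row slice row[:min(i+1, ncols)] over enumerate(matrix), removing the inner loop and the conditional (the slice copies in C instead of per-element appends).
import Mathlib
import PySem

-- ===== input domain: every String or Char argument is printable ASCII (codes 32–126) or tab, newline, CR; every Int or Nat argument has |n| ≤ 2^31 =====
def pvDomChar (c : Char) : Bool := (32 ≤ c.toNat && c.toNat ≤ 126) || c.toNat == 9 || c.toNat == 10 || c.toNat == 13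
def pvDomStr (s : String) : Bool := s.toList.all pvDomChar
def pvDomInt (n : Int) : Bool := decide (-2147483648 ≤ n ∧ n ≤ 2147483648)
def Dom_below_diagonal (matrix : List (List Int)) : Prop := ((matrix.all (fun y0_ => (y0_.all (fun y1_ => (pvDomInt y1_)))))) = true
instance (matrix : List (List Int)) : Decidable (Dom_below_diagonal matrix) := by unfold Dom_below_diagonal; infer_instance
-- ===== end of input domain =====

-- B replaces A's nested column loop and j<=i filter by one slice row[:min(i+1, ncols)] per row (objective: simpler).

-- ===== PORT A =====
-- literal port of A: outer loop over range(len(matrix)), inner loop over range(len(matrix[0]))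
-- appending matrix[i][j] when j <= i; indexing via pyGetD is exact on Pre_ (indices in range there).
def below_diagonal (matrix : List (List Int)) : List (List Int) :=
  (PySem.List.pyRange 0 (PySem.List.len matrix)).foldl
    (fun left_half_matrix i =>
      let list := (PySem.List.pyRange 0 (PySem.List.len (PySem.List.pyGetD matrix 0 []))).foldl
        (fun l j => if j ≤ i then l ++ [PySem.List.pyGetD (PySem.List.pyGetD matrix i []) j 0] else l) []
      left_half_matrix ++ [list]) []

-- ===== PORT B =====
def below_diagonal_alt (matrix : List (List Int)) : List (List Int) :=
  let ncols : Int := if matrix.isEmpty then 0 else PySem.List.len (matrix.headD [])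
  (PySem.List.enumerate matrix).map (fun p => PySem.List.slice p.2 none (some (min (p.1 + 1) ncols)))

-- ===== PRECONDITION & SPEC =====
-- Pre_ excludes exactly the inputs on which A raises IndexError: ragged matrices with a row k
-- shorter than min(k+1, len(matrix[0])); A returns normally everywhere else, and there B matches it.
def Pre_below_diagonal (matrix : List (List Int)) : Prop :=
  ∀ k, k < matrix.length →
    min (k+1) ((matrix.headD []).length) ≤ (matrix.getD k []).length
instance (matrix : List (List Int)) : Decidable (Pre_below_diagonal matrix) := by
  unfold Pre_below_diagonal; infer_instance
def pvWitness_below_diagonal : List (List Int) := [[1, 2, 3], [4, 5, 6], [7, 8, 9]]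
def Spec_below_diagonal (matrix : List (List Int)) (out : List (List Int)) : Prop := out = below_diagonal_alt matrix
instance (matrix : List (List Int)) (out : List (List Int)) : Decidable (Spec_below_diagonal matrix out) := by unfold Spec_below_diagonal; infer_instance

-- ===== CLAIM (what is proved, stated in full; the proofs are below) =====
def Claim_equal_below_diagonal : Prop := ∀ (matrix : List (List Int)), Dom_below_diagonal matrix → Pre_below_diagonal matrix → Spec_below_diagonal matrix (below_diagonal matrix)

-- ===== LEMMAS AND PROOFS =====

-- the j <= i filter keeps exactly the first min (k+1) c column indices
lemma pv_filter_le (c k : Nat) : (PySem.List.pyRange 0 (c:Int)).filter (fun j => decide (j ≤ (k:Int)))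
    = PySem.List.pyRange 0 ((min (k+1) c : Nat):Int) := by
  induction c with
  | zero => simp [PySem.List.pyRange]
  | succ c ih =>
    rw [show ((c+1:Nat):Int) = (c:Int)+1 by push_cast; ring,
        PySem.List.pyRange_one_succ_right (by positivity)]
    rw [List.filter_append, ih]
    by_cases h : (c:Int) ≤ (k:Int)
    · have hc : c ≤ k := by exact_mod_cast h
      have h1 : min (k+1) (c+1) = c+1 := by omega
      have h2 : min (k+1) c = c := by omega
      simp [h, h1, h2]
      rw [PySem.List.pyRange_one_succ_right (by positivity)]
    · have hc : ¬ c ≤ k := by intro hh; exact h (by exact_mod_cast hh)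
      have h1 : min (k+1) (c+1) = min (k+1) c := by omega
      simp [h, h1]

-- reading the first m in-range positions of xs is xs.take m
lemma pv_map_take (xs : List Int) (m : Nat) (hm : m ≤ xs.length) :
    (PySem.List.pyRange 0 (m:Int)).map (fun j => PySem.List.pyGetD xs j 0) = xs.take m := by
  have h0 := PySem.List.map_pyGetD_pyRange_zero (xs.take m) 0
  have hl : PySem.List.len (xs.take m) = (m:Int) := by
    simp [PySem.List.len]; omega
  rw [hl] at h0
  rw [← h0]
  apply List.map_congr_left
  intro j hj
  rcases PySem.List.mem_pyRange_one.mp hj with ⟨h1, h2⟩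
  lift j to Nat using h1 with t
  have ht : t < m := by exact_mod_cast h2
  rw [PySem.List.pyGetD_natCast, PySem.List.pyGetD_natCast]
  rw [List.getD_eq_getElem?_getD, List.getD_eq_getElem?_getD, List.getElem?_take_of_lt ht]

-- ===== VERDICT (by name: the statement is the Claim_ definition above) =====
theorem below_diagonal_spec : Claim_equal_below_diagonal := by
  intro matrix _ hp
  unfold Spec_below_diagonal below_diagonal below_diagonal_alt
  simp only []
  rw [PySem.List.enumerate_eq_map_pyRange matrix []]
  rw [PySem.List.foldl_append_singleton_eq_map]
  rw [List.map_map]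
  apply List.map_congr_left
  intro i hi
  rcases PySem.List.mem_pyRange_one.mp hi with ⟨h1, h2⟩
  lift i to Nat using h1 with k
  have hk : k < matrix.length := by simpa [PySem.List.len] using h2
  have hrow : PySem.List.pyGetD matrix (k:Int) [] = matrix.getD k [] :=
    PySem.List.pyGetD_natCast matrix k []
  have hmin := hp k hk
  have hne : matrix.isEmpty = false := by
    cases matrix
    · simp at hk
    · simp
  have hrow0 : PySem.List.pyGetD matrix (0:Int) [] = matrix.headD [] := by
    have h00 : ((0:Nat):Int) = (0:Int) := rfl
    rw [← h00, PySem.List.pyGetD_natCast]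
    cases matrix <;> simp
  simp only [Function.comp, hrow, hrow0, hne, Bool.false_eq_true, if_false]
  have hfold := PySem.List.foldl_append_if (fun j => decide (j ≤ (k:Int)))
      (fun j => PySem.List.pyGetD (matrix.getD k []) j 0)
      (PySem.List.pyRange 0 (PySem.List.len (matrix.headD []))) []
  simp only [decide_eq_true_eq] at hfold
  rw [hfold]
  have hlen : PySem.List.len (matrix.headD []) = (((matrix.headD []).length : Nat) : Int) := by
    simp [PySem.List.len]
  rw [hlen, pv_filter_le ((matrix.headD []).length) k, pv_map_take _ _ (by omega)]
  have hcast : ((k:Int) + 1) = ((k+1 : Nat) : Int) := by push_cast; ring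
  rw [hcast, ← Nat.cast_min, PySem.List.slice_to_natCast]
  simp
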